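-- pv_equiv track=rewrite | github.com/seqeralabs/docs | platform-cloud/docs/cli/scripts/extract-overlays.py | extract_intro_content
-- ===== SOURCE A (Python) =====
-- def extract_intro_content(section_content):
--     """Extract introductory content before first ### heading."""
--     lines = section_content.split('\n')
--     intro = []
--
--     for line in lines:
--         if line.startswith('###'):
--             break
--         intro.append(line)
--
--     return '\n'.join(intro).strip()
-- ===== SOURCE B (Python) =====
-- def extract_intro_content(section_content):
--     """Extract introductory content before first ### heading."""
--     if section_content.startswith('###'):
--         return ''
--     idx = section_content.find('\n###')
--     intro = section_content if idx == -1 else section_content[:idx]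
--     return intro.strip()
-- ===== Notes on version B (the rewrite author's own statement) =====
-- stated objective: simpler
-- what changed: Replaces the split-into-lines loop with break and join by a single substring search: the intro is the prefix of the string before the first line starting with '###' (position of the first '\n###', or the whole string), then stripped.
import Mathlib
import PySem

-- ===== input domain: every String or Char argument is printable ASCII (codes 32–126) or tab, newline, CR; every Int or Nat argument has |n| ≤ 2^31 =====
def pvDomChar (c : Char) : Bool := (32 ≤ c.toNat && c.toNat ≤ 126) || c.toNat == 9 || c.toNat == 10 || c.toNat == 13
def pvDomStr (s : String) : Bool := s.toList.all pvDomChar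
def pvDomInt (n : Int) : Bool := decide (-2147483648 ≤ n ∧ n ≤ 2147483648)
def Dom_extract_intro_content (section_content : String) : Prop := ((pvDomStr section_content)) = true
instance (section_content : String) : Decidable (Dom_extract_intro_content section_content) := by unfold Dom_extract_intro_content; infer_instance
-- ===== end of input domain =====

-- B replaces A's split-into-lines loop with one substring search ('\n###' / leading '###'): same result, simpler shape.

-- ===== PORT A =====
-- the 'for line in lines: if line.startswith("###"): break; intro.append(line)' loop
def pvLoopA : List String → List String
  | [] => []
  | l :: ls => if PySem.Str.startswith l "###" then [] else l :: pvLoopA ls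

def extract_intro_content (section_content : String) : String :=
  let lines := (PySem.Str.split? section_content "\n").getD []
  PySem.Str.strip (PySem.Str.join "\n" (pvLoopA lines))

-- ===== PORT B =====
def extract_intro_content_alt (section_content : String) : String :=
  if PySem.Str.startswith section_content "###" then "" else
  let idx := PySem.Str.find section_content "\n###"
  let intro := if idx == -1 then section_content else PySem.Str.slice section_content none (some idx)
  PySem.Str.strip intro

-- ===== PRECONDITION & SPEC =====
def Spec_extract_intro_content (section_content : String) (out : String) : Prop := out = extract_intro_content_alt section_content
instance (section_content : String) (out : String) : Decidable (Spec_extract_intro_content section_content out) := by unfold Spec_extract_intro_content; infer_instance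

-- ===== CLAIM (what is proved, stated in full; the proofs are below) =====
def Claim_equal_extract_intro_content : Prop := ∀ (section_content : String), Dom_extract_intro_content section_content → Spec_extract_intro_content section_content (extract_intro_content section_content)

-- ===== LEMMAS AND PROOFS =====

-- split('\n') written as a structural recursion, to reason about splitOn.go
def pvSplitNl : List Char → List (List Char)
  | [] => [[]]
  | c :: cs =>
      if c = '\n' then [] :: pvSplitNl cs
      else match pvSplitNl cs with
           | [] => [[c]]
           | p :: ps => (c :: p) :: ps

-- the line loop on the char level
def pvLoopC : List (List Char) → List (List Char)
  | [] => []
  | l :: ls => if PySem.Chars.startswith l ['#','#','#'] then [] else l :: pvLoopC ls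

theorem pvSplitNl_ne_nil (cs : List Char) : pvSplitNl cs ≠ [] := by
  induction cs with
  | nil => simp [pvSplitNl]
  | cons c cs ih =>
    simp only [pvSplitNl]
    split_ifs with h
    · simp
    · cases hs : pvSplitNl cs <;> simp

theorem pvSplitNl_go (fuel : Nat) (l cur : List Char) (acc : List (List Char))
    (h : l.length < fuel) :
    PySem.Chars.splitOn.go ['\n'] fuel l cur acc =
      acc.reverse ++ (match pvSplitNl l with
                      | [] => []
                      | p :: ps => (cur.reverse ++ p) :: ps) := by
  induction fuel generalizing l cur acc with
  | zero => omega
  | succ f ih =>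
    cases l with
    | nil => simp [PySem.Chars.splitOn.go, pvSplitNl]
    | cons c rest =>
      by_cases hc : c = '\n'
      · subst hc
        have hpre : List.isPrefixOf ['\n'] ('\n' :: rest) = true := by
          simp [List.isPrefixOf]
        rw [PySem.Chars.splitOn.go]
        simp only [hpre, if_true, List.length_cons, List.length_nil, Nat.zero_add,
          List.drop_succ_cons, List.drop_zero] at *
        rw [ih rest [] (List.reverse cur :: acc) (by omega)]
        rcases hs : pvSplitNl rest with _ | ⟨p, ps⟩
        · exact absurd hs (pvSplitNl_ne_nil rest)
        · simp [pvSplitNl, hs]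
      · have hpre : List.isPrefixOf ['\n'] (c :: rest) = true → False := by
          simp [List.isPrefixOf]; intro h'; exact hc h'.symm
        rw [PySem.Chars.splitOn.go]
        simp only [List.length_cons] at h
        rw [if_neg hpre]
        rw [ih rest (c :: cur) acc (by omega)]
        rcases hs : pvSplitNl rest with _ | ⟨p, ps⟩
        · exact absurd hs (pvSplitNl_ne_nil rest)
        · simp [pvSplitNl, hc, hs]

theorem pvSplitOn_eq (cs : List Char) :
    PySem.Chars.splitOn cs ['\n'] = pvSplitNl cs := by
  unfold PySem.Chars.splitOn
  rw [pvSplitNl_go (cs.length + 1) cs [] [] (by omega)]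
  rcases hs : pvSplitNl cs with _ | ⟨p, ps⟩
  · exact absurd hs (pvSplitNl_ne_nil cs)
  · simp

theorem pvSplitNl_head_prefix (cs : List Char) (p : List Char) (ps : List (List Char))
    (h : pvSplitNl cs = p :: ps) : p <+: cs := by
  induction cs generalizing p ps with
  | nil =>
    simp only [pvSplitNl] at h
    injection h with h1 h2
    subst h1
    exact List.nil_prefix
  | cons c cs ih =>
    simp only [pvSplitNl] at h
    split_ifs at h with hc
    · injection h with h1 h2
      subst h1
      exact List.nil_prefix
    · rcases hs : pvSplitNl cs with _ | ⟨q, qs⟩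
      · exact absurd hs (pvSplitNl_ne_nil cs)
      · rw [hs] at h
        injection h with h1 h2
        subst h1
        exact List.cons_prefix_cons.mpr ⟨rfl, ih q qs hs⟩

-- if the whole string starts with '###', so does its first line
theorem pvSplitNl_head_hash (cs : List Char) (h : ['#','#','#'] <+: cs)
    (p : List Char) (ps : List (List Char)) (hs : pvSplitNl cs = p :: ps) :
    ['#','#','#'] <+: p := by
  obtain ⟨t, rfl⟩ := h
  rcases ht : pvSplitNl t with _ | ⟨q, qs⟩
  · exact absurd ht (pvSplitNl_ne_nil t)
  · simp [pvSplitNl, ht] at hs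
    obtain ⟨h1, -⟩ := hs
    rw [← h1]
    exact ⟨q, rfl⟩

theorem pvJoin_cons_head (c : Char) (q : List Char) (t : List (List Char)) :
    PySem.Chars.join ['\n'] ((c :: q) :: t) = c :: PySem.Chars.join ['\n'] (q :: t) := by
  cases t with
  | nil => simp [PySem.Chars.join_singleton]
  | cons b bs => rw [PySem.Chars.join_cons_cons, PySem.Chars.join_cons_cons]; simp

-- no line of cs starts with '###' except possibly the first ⇒ the loop keeps everything after the first line
theorem pvJoin_loop_all (cs : List Char) (p : List Char) (ps : List (List Char))
    (hs : pvSplitNl cs = p :: ps)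
    (hni : ¬ ('\n' :: '#' :: '#' :: '#' :: []) <:+: cs) :
    PySem.Chars.join ['\n'] (p :: pvLoopC ps) = cs := by
  induction cs generalizing p ps with
  | nil =>
    simp [pvSplitNl] at hs
    obtain ⟨rfl, rfl⟩ := hs
    simp [pvLoopC, PySem.Chars.join_singleton]
  | cons c cs ih =>
    by_cases hc : c = '\n'
    · subst hc
      simp only [pvSplitNl, if_pos] at hs
      obtain ⟨rfl, hps⟩ := List.cons.inj hs
      rcases ht : pvSplitNl cs with _ | ⟨q, qs⟩
      · exact absurd ht (pvSplitNl_ne_nil cs)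
      · subst hps
        rw [ht]
        have hq : ¬ ['#','#','#'] <+: q := by
          intro hq
          exact hni (List.cons_prefix_cons.mpr
            ⟨rfl, hq.trans (pvSplitNl_head_prefix cs q qs ht)⟩).isInfix
        have hsw : PySem.Chars.startswith q ['#','#','#'] = false := by
          rw [← Bool.not_eq_true, PySem.Chars.startswith_iff]; exact hq
        simp only [pvLoopC, hsw, Bool.false_eq_true, if_false]
        rw [PySem.Chars.join_cons_cons]
        have := ih q qs ht (fun h => hni (h.trans (List.suffix_cons _ _).isInfix))
        simp [this]
    · simp only [pvSplitNl, if_neg hc] at hs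
      rcases ht : pvSplitNl cs with _ | ⟨q, qs⟩
      · exact absurd ht (pvSplitNl_ne_nil cs)
      · rw [ht] at hs
        obtain ⟨h1, h2⟩ := List.cons.inj hs
        subst h1; subst h2
        rw [pvJoin_cons_head]
        have := ih q qs ht (fun h => hni (h.trans (List.suffix_cons _ _).isInfix))
        rw [this]

-- the loop cuts exactly at the first occurrence of '\n###'
theorem pvJoin_loop_cut (cs : List Char) (n : Nat) (p : List Char) (ps : List (List Char))
    (hs : pvSplitNl cs = p :: ps)
    (hat : ('\n' :: '#' :: '#' :: '#' :: []) <+: cs.drop n)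
    (hfirst : ∀ j < n, ¬ ('\n' :: '#' :: '#' :: '#' :: []) <+: cs.drop j) :
    PySem.Chars.join ['\n'] (p :: pvLoopC ps) = cs.take n := by
  induction cs generalizing n p ps with
  | nil =>
    simp at hat
  | cons c cs ih =>
    cases n with
    | zero =>
      simp only [List.drop_zero] at hat
      obtain ⟨hc, hrest⟩ := List.cons_prefix_cons.mp hat
      subst hc
      simp only [pvSplitNl, if_pos] at hs
      obtain ⟨rfl, hps⟩ := List.cons.inj hs
      rcases ht : pvSplitNl cs with _ | ⟨q, qs⟩
      · exact absurd ht (pvSplitNl_ne_nil cs)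
      · subst hps
        rw [ht]
        have hq : ['#','#','#'] <+: q := pvSplitNl_head_hash cs hrest q qs ht
        have hsw : PySem.Chars.startswith q ['#','#','#'] = true := by
          rw [PySem.Chars.startswith_iff]; exact hq
        simp [pvLoopC, hsw, PySem.Chars.join_singleton]
    | succ n' =>
      have hat' : ('\n' :: '#' :: '#' :: '#' :: []) <+: cs.drop n' := by simpa using hat
      have hfirst' : ∀ j < n', ¬ ('\n' :: '#' :: '#' :: '#' :: []) <+: cs.drop j := by
        intro j hj
        have := hfirst (j + 1) (by omega)
        simpa using this
      by_cases hc : c = '\n'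
      · subst hc
        simp only [pvSplitNl, if_pos] at hs
        obtain ⟨rfl, hps⟩ := List.cons.inj hs
        rcases ht : pvSplitNl cs with _ | ⟨q, qs⟩
        · exact absurd ht (pvSplitNl_ne_nil cs)
        · subst hps
          rw [ht]
          have hq : ¬ ['#','#','#'] <+: q := by
            intro hq
            exact hfirst 0 (by omega) (by
              simp only [List.drop_zero]
              exact List.cons_prefix_cons.mpr ⟨rfl, hq.trans (pvSplitNl_head_prefix cs q qs ht)⟩)
          have hsw : PySem.Chars.startswith q ['#','#','#'] = false := by
            rw [← Bool.not_eq_true, PySem.Chars.startswith_iff]; exact hq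
          simp only [pvLoopC, hsw, Bool.false_eq_true, if_false]
          rw [PySem.Chars.join_cons_cons]
          have := ih n' q qs ht hat' hfirst'
          simp [this]
      · simp only [pvSplitNl, if_neg hc] at hs
        rcases ht : pvSplitNl cs with _ | ⟨q, qs⟩
        · exact absurd ht (pvSplitNl_ne_nil cs)
        · rw [ht] at hs
          obtain ⟨h1, h2⟩ := List.cons.inj hs
          subst h1; subst h2
          rw [pvJoin_cons_head]
          rw [ih n' q qs ht hat' hfirst']
          simp

-- char-level main theorem
theorem pvMainChars (cs : List Char) :
    PySem.Chars.strip (PySem.Chars.join ['\n'] (pvLoopC (pvSplitNl cs))) =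
      (if PySem.Chars.startswith cs ['#','#','#'] then ([] : List Char) else
        if PySem.Chars.find cs ['\n','#','#','#'] = -1 then PySem.Chars.strip cs
        else PySem.Chars.strip
          (PySem.List.slice cs none (some (PySem.Chars.find cs ['\n','#','#','#'])))) := by
  rcases hs : pvSplitNl cs with _ | ⟨p, ps⟩
  · exact absurd hs (pvSplitNl_ne_nil cs)
  by_cases hsw : PySem.Chars.startswith cs ['#','#','#'] = true
  · -- first line starts with ### → loop returns [], join = [], strip = []
    have hp : ['#','#','#'] <+: p :=
      pvSplitNl_head_hash cs (PySem.Chars.startswith_iff cs _ |>.mp hsw) p ps hs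
    have : PySem.Chars.startswith p ['#','#','#'] = true :=
      (PySem.Chars.startswith_iff p _).mpr hp
    simp [hsw, pvLoopC, this, PySem.Chars.join_nil]
    decide
  · rw [if_neg hsw]
    have hnp : ¬ ['#','#','#'] <+: cs := fun h => hsw ((PySem.Chars.startswith_iff cs _).mpr h)
    have hploop : ¬ ['#','#','#'] <+: p := fun h =>
      hnp (h.trans (pvSplitNl_head_prefix cs p ps hs))
    have hpsw : PySem.Chars.startswith p ['#','#','#'] = false := by
      rw [← Bool.not_eq_true, PySem.Chars.startswith_iff]; exact hploop
    have hloop : pvLoopC (p :: ps) = p :: pvLoopC ps := by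
      simp [pvLoopC, hpsw]
    rw [hloop]
    by_cases hf : PySem.Chars.find cs ['\n','#','#','#'] = -1
    · rw [if_pos hf]
      have hni := (PySem.Chars.find_eq_neg_one_iff cs _).mp hf
      rw [pvJoin_loop_all cs p ps hs hni]
    · rw [if_neg hf]
      have h0 : 0 ≤ PySem.Chars.find cs ['\n','#','#','#'] := by
        have := PySem.Chars.neg_one_le_find (s := cs) (sub := ['\n','#','#','#'])
        omega
      obtain ⟨hat, hfirst⟩ := PySem.Chars.find_spec h0
      rw [PySem.List.slice_to cs h0]
      rw [pvJoin_loop_cut cs (PySem.Chars.find cs ['\n','#','#','#']).toNat p ps hs hat hfirst]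

-- bridge: the String-level loop is the char-level loop
theorem pvLoopA_map (ls : List (List Char)) :
    pvLoopA (ls.map String.ofList) = (pvLoopC ls).map String.ofList := by
  induction ls with
  | nil => simp [pvLoopA, pvLoopC]
  | cons l ls ih =>
    simp only [List.map_cons, pvLoopA, pvLoopC]
    have : PySem.Str.startswith (String.ofList l) "###" =
        PySem.Chars.startswith l ['#','#','#'] := by
      rw [PySem.Str.startswith_eq]
      simp
    rw [this]
    split_ifs with h
    · simp
    · simp [ih]

-- ===== VERDICT (by name: the statement is the Claim_ definition above) =====
theorem extract_intro_content_spec : Claim_equal_extract_intro_content := by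
  intro s _
  unfold Spec_extract_intro_content extract_intro_content extract_intro_content_alt
  have hsplit : PySem.Str.split? s "\n" =
      some ((pvSplitNl s.toList).map String.ofList) := by
    unfold PySem.Str.split?
    have h1 : PySem.Chars.split? s.toList "\n".toList =
        some (PySem.Chars.splitOn s.toList ['\n']) := by
      unfold PySem.Chars.split?
      simp
    rw [h1, pvSplitOn_eq]
    rfl
  rw [hsplit]
  simp only [Option.getD_some]
  rw [pvLoopA_map]
  apply String.toList_inj.mp
  have hA : (PySem.Str.strip (PySem.Str.join "\n"
      ((pvLoopC (pvSplitNl s.toList)).map String.ofList))).toList =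
      PySem.Chars.strip (PySem.Chars.join ['\n'] (pvLoopC (pvSplitNl s.toList))) := by
    unfold PySem.Str.strip PySem.Str.join
    rw [String.toList_ofList, String.toList_ofList]
    have hnl : ("\n" : String).toList = ['\n'] := by decide
    have hmap : (String.toList ∘ String.ofList) = (id : List Char → List Char) := by
      funext l; exact String.toList_ofList
    rw [hnl, List.map_map, hmap, List.map_id]
  rw [hA, pvMainChars]
  have hsw : PySem.Str.startswith s "###" = PySem.Chars.startswith s.toList ['#','#','#'] := by
    rw [PySem.Str.startswith_eq]
    congr 1
  have hfd : PySem.Str.find s "\n###" = PySem.Chars.find s.toList ['\n','#','#','#'] := by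
    rw [PySem.Str.find_eq]
    congr 1
  by_cases h1 : PySem.Chars.startswith s.toList ['#','#','#'] = true
  · rw [if_pos h1, if_pos (hsw.trans h1)]
    rfl
  · rw [if_neg h1]
    have h1' : ¬ PySem.Str.startswith s "###" = true := by rw [hsw]; exact h1
    rw [if_neg h1']
    by_cases h2 : PySem.Chars.find s.toList ['\n','#','#','#'] = -1
    · rw [if_pos h2]
      have he : (PySem.Str.find s "\n###" == -1) = true := by
        rw [hfd]
        exact decide_eq_true h2
      rw [if_pos he]
      unfold PySem.Str.strip
      rw [String.toList_ofList]
    · rw [if_neg h2]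
      have he : ¬ (PySem.Str.find s "\n###" == -1) = true := by
        rw [hfd]
        simpa using h2
      rw [if_neg he]
      unfold PySem.Str.strip PySem.Str.slice
      rw [String.toList_ofList, String.toList_ofList, hfd]
      rw [PySem.Chars.slice_eq_listSlice]
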